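-- pv_equiv track=rewrite | github.com/monas1975/Python_nauka | lab1/homework01/task03.py | oov
-- ===== SOURCE A (Python) =====
-- def oov(text, vocab):
--     resultList =[]
--     textList=text.split()   #"rozbijam" text na wyrazy, znak rozdzialu spacja, i umieszczam w liscie
--     for item in textList:   # przeszukuje liste
--        if item not in vocab:  #sprawdzam czy wyraz jest w slowniku
--            if item not in resultList:   #jesli nie jest oraz jesli juz nie zostal dodany do  wyniku to dodaje do listy z wynikami
--              resultList.append(item)
--     resultList.sort()  #sortuje rosnaco
--     return resultList
-- ===== SOURCE B (Python) =====
-- def oov(text, vocab):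
--     result = []
--     prev = None
--     for w in sorted(text.split()):
--         if w != prev and w not in vocab:
--             result.append(w)
--         prev = w
--     return result
-- ===== Notes on version B (the rewrite author's own statement) =====
-- stated objective: alternative
-- what changed: B sorts the split words first and makes one pass with a prev sentinel to drop adjacent duplicates, instead of A's per-word linear membership scan of the growing result list followed by a final sort.
import Mathlib
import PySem

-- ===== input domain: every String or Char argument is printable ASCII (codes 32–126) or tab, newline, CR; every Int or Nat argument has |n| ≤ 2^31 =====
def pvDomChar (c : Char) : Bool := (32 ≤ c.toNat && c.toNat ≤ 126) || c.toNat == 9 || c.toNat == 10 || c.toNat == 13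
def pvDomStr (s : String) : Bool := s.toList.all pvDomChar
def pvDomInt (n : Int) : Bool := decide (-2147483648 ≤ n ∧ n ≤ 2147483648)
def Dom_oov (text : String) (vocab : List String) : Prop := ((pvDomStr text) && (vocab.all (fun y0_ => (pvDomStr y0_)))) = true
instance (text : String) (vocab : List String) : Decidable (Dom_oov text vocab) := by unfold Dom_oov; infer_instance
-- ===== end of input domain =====

-- B sorts the split words first and removes adjacent duplicates in one pass with a 'prev'
-- sentinel, instead of A's per-word membership scan of the growing result list plus final sort.

-- ===== PORT A =====
def oov (text : String) (vocab : List String) : List String :=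
  let textList := PySem.Str.split₀ text
  let resultList := textList.foldl (fun acc item =>
    if item ∉ vocab then
      (if item ∉ acc then acc ++ [item] else acc)
    else acc) []
  PySem.List.sorted resultList (fun x => x) false

-- ===== PORT B =====
def oov_alt (text : String) (vocab : List String) : List String :=
  let ws := PySem.List.sorted (PySem.Str.split₀ text) (fun x => x) false
  (ws.foldl (fun (st : List String × Option String) w =>
    (if some w ≠ st.2 ∧ w ∉ vocab then st.1 ++ [w] else st.1, some w)) ([], none)).1

-- ===== PRECONDITION & SPEC =====
def Spec_oov (text : String) (vocab : List String) (out : List String) : Prop := out = oov_alt text vocab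
instance (text : String) (vocab : List String) (out : List String) : Decidable (Spec_oov text vocab out) := by unfold Spec_oov; infer_instance

-- ===== CLAIM (what is proved, stated in full; the proofs are below) =====
def Claim_equal_oov : Prop := ∀ (text : String) (vocab : List String), Dom_oov text vocab → Spec_oov text vocab (oov text vocab)

-- ===== LEMMAS AND PROOFS =====

-- the suffix of B's scan produced from remaining words `ss` with previous word `p`
def bscan (vocab : List String) : List String → Option String → List String
  | [], _ => []
  | w :: t, p => (if some w ≠ p ∧ w ∉ vocab then [w] else []) ++ bscan vocab t (some w)

theorem bscan_fold (vocab : List String) (ss : List String) :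
    ∀ (acc : List String) (p : Option String),
      (ss.foldl (fun (st : List String × Option String) w =>
        (if some w ≠ st.2 ∧ w ∉ vocab then st.1 ++ [w] else st.1, some w)) (acc, p)).1
      = acc ++ bscan vocab ss p := by
  induction ss with
  | nil => intro acc p; simp [bscan]
  | cons w t ih =>
    intro acc p
    simp only [List.foldl_cons, bscan]
    by_cases h : some w ≠ p ∧ w ∉ vocab <;> simp [h, ih]

theorem mem_bscan (vocab : List String) (ss : List String) :
    ∀ (p : Option String), ss.Pairwise (· ≤ ·) →
      (∀ y ∈ ss, ∀ v, p = some v → v ≤ y) →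
      ∀ (x : String),
        (x ∈ bscan vocab ss p ↔ x ∈ ss ∧ x ∉ vocab ∧ p ≠ some x) := by
  induction ss with
  | nil => intro p _ _ x; simp [bscan]
  | cons w t ih =>
    intro p hs hp x
    rw [List.pairwise_cons] at hs
    have hp' : ∀ y ∈ t, ∀ v, (some w : Option String) = some v → v ≤ y := by
      intro y hy v hv
      cases hv; exact hs.1 y hy
    have key : ∀ x, x ∈ w :: t → p = some x → x = w := by
      -- with p ≤ every element of w :: t and the list sorted, p can only re-occur as the head
      intro x hx hpx
      rcases List.mem_cons.mp hx with rfl | hxt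
      · rfl
      · exact le_antisymm (hp w (List.mem_cons_self) x hpx) (hs.1 x hxt)
    simp only [bscan, List.mem_append, ih (some w) hs.2 hp', List.mem_cons]
    by_cases hw : some w ≠ p ∧ w ∉ vocab
    · simp only [if_pos hw, List.mem_singleton]
      constructor
      · rintro (rfl | ⟨hxt, hxv, hxw⟩)
        · exact ⟨Or.inl rfl, hw.2, fun h => hw.1 h.symm⟩
        · refine ⟨Or.inr hxt, hxv, fun hpx => ?_⟩
          exact hxw (by rw [key x (List.mem_cons_of_mem _ hxt) hpx])
      · rintro ⟨(rfl | hxt), hxv, hxp⟩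
        · exact Or.inl rfl
        · by_cases hxw : x = w
          · exact Or.inl hxw
          · exact Or.inr ⟨hxt, hxv, fun h => hxw (Option.some.inj h).symm⟩
    · simp only [if_neg hw, List.not_mem_nil, false_or]
      constructor
      · rintro ⟨hxt, hxv, hxw⟩
        refine ⟨Or.inr hxt, hxv, fun hpx => ?_⟩
        exact hxw (congrArg some (key x (List.mem_cons_of_mem _ hxt) hpx).symm)
      · rintro ⟨hmem, hxv, hxp⟩
        have hxw : x ≠ w := by
          rintro rfl
          rcases not_and_or.mp hw with h1 | h2
          · push Not at h1; exact hxp h1.symm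
          · exact h2 hxv
        rcases hmem with rfl | hxt
        · exact absurd rfl hxw
        · exact ⟨hxt, hxv, fun h => hxw (Option.some.inj h).symm⟩

theorem pairwise_bscan (vocab : List String) (ss : List String) :
    ∀ (p : Option String), ss.Pairwise (· ≤ ·) →
      (bscan vocab ss p).Pairwise (· < ·) := by
  induction ss with
  | nil => intro p _; simp [bscan]
  | cons w t ih =>
    intro p hs
    rw [List.pairwise_cons] at hs
    have hp' : ∀ y ∈ t, ∀ v, (some w : Option String) = some v → v ≤ y := by
      intro y hy v hv; cases hv; exact hs.1 y hy
    simp only [bscan]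
    refine List.pairwise_append.mpr ⟨?_, ih (some w) hs.2, ?_⟩
    · by_cases hw : some w ≠ p ∧ w ∉ vocab <;> simp [hw]
    · intro x hx y hy
      by_cases hw : some w ≠ p ∧ w ∉ vocab
      · simp only [if_pos hw, List.mem_singleton] at hx
        subst hx
        have hm := (mem_bscan vocab t (some x) hs.2 hp' y).mp hy
        exact lt_of_le_of_ne (hs.1 y hm.1) (fun h => hm.2.2 (congrArg some h))
      · simp [hw] at hx

theorem oov_spec : Claim_equal_oov := by
  intro text vocab _
  unfold Spec_oov oov oov_alt
  simp only []
  set ws := PySem.Str.split₀ text with hws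
  set ss := PySem.List.sorted ws (fun x => x) false with hss
  -- A's loop is dedup-of-filter
  have hA : ws.foldl (fun acc item =>
      if item ∉ vocab then (if item ∉ acc then acc ++ [item] else acc) else acc) []
      = PySem.Set.ofList (ws.filter (fun x => decide (x ∉ vocab))) := by
    rw [PySem.List.foldl_ite_eq_foldl_filter]
    rw [PySem.Set.ofList_eq_foldl]
    apply PySem.List.foldl_congr_mem
    intro acc x _
    rw [PySem.Set.add_eq_ite]
    by_cases h : x ∈ acc <;> simp [h]
  -- B's loop is bscan over the sorted words
  have hB : (ss.foldl (fun (st : List String × Option String) w =>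
      (if some w ≠ st.2 ∧ w ∉ vocab then st.1 ++ [w] else st.1, some w)) ([], none)).1
      = bscan vocab ss none := by
    rw [bscan_fold]; simp
  rw [hA, hB]
  have hsorted : ss.Pairwise (· ≤ ·) := by
    have := PySem.List.sorted_pairwise (xs := ws) (key := fun x => x)
    simpa using this
  have hpnone : ∀ y ∈ ss, ∀ v, (none : Option String) = some v → v ≤ y := by
    intro y _ v hv; cases hv
  have hperm : (bscan vocab ss none).Perm
      (PySem.Set.ofList (ws.filter (fun x => decide (x ∉ vocab)))) := by
    rw [List.perm_ext_iff_of_nodup]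
    · intro x
      rw [mem_bscan vocab ss none hsorted hpnone x, PySem.Set.mem_ofList, List.mem_filter]
      constructor
      · rintro ⟨hx, hv, _⟩
        exact ⟨by rw [hss] at hx; rwa [PySem.List.mem_sorted] at hx, by simpa using hv⟩
      · rintro ⟨hx, hv⟩
        refine ⟨by rw [hss, PySem.List.mem_sorted]; exact hx, by simpa using hv, by simp⟩
    · exact (pairwise_bscan vocab ss none hsorted).imp ne_of_lt
    · exact PySem.Set.nodup_ofList (xs := ws.filter (fun x => decide (x ∉ vocab)))
  have := PySem.List.sorted_eq_of_perm_of_pairwise_lt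
    (xs := PySem.Set.ofList (ws.filter (fun x => decide (x ∉ vocab))))
    (ys := bscan vocab ss none) (key := fun x => x)
    hperm (by simpa using pairwise_bscan vocab ss none hsorted)
  exact this.symm ▸ rfl
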